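-- pv_equiv track=rewrite | github.com/malaonda222/Python | ESERCIZI_ESTATE/Dizionari/23.py | miglior_voto_per_materia
-- ===== SOURCE A (Python) =====
-- def miglior_voto_per_materia(studenti: list[dict[str, dict[str, list[int]]]]) -> dict[str, int]:
--     new_dict = {}
--     for studente in studenti:
--         for materia, voti in studente["materie"].items():
--             if materia not in new_dict:
--                 new_dict[materia] = max(voti)
--             else:
--                 new_dict[materia] = max(new_dict[materia], max(voti))
--     return new_dict
-- ===== SOURCE B (Python) =====
-- def miglior_voto_per_materia(studenti: list[dict[str, dict[str, list[int]]]]) -> dict[str, int]: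
--     # Flatten to (subject, student's max) pairs, then reduce each subject group
--     # over the flat list, subjects taken in first-seen order.
--     pairs = [(materia, max(voti))
--              for studente in studenti
--              for materia, voti in studente["materie"].items()]
--     subjects = list(dict.fromkeys(materia for materia, _ in pairs))
--     return {m: max(v for k, v in pairs if k == m) for m in subjects}
-- ===== Notes on version B (the rewrite author's own statement) =====
-- stated objective: alternative
-- what changed: B replaces A's single-pass running-max dict by a flatten-then-group scheme: it flattens the input to a flat list of (subject, per-student max) pairs, takes the subjects in first-occurrence order, and computes each subject's answer by one max over the matching pairs of the flat list.
import Mathlib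
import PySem

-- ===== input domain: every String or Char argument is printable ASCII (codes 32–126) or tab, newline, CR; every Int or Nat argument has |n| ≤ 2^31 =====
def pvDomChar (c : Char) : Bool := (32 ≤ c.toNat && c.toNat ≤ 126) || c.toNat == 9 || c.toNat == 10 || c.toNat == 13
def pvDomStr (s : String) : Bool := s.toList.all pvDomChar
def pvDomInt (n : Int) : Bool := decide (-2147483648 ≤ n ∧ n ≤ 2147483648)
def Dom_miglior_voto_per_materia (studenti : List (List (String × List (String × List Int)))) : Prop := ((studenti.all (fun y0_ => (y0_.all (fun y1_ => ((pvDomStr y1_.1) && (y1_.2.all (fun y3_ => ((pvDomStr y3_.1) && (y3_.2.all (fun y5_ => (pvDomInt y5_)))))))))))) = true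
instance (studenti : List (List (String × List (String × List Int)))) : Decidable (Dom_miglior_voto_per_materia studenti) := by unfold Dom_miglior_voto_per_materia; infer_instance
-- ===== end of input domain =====

-- B replaces A's single-pass running-max dict by a flatten-then-group scheme: flatten the input
-- to (subject, per-student max) pairs, list subjects in first-seen order, reduce each group by one max.


-- Python's max(voti) on a nonempty list of ints (total form; Pre_ keeps the lists nonempty)
def pyMax (l : List Int) : Int := (PySem.List.max? l (fun y => y)).getD 0

-- ===== PORT A =====
-- loop body of A: running max per subject with the 'materia not in new_dict' guard
def updateA (nd : PySem.Dict String Int) (mv : String × List Int) : PySem.Dict String Int :=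
  if nd.contains mv.1 = false then nd.insert mv.1 (pyMax mv.2)
  else nd.insert mv.1 (max (nd.getD mv.1 0) (pyMax mv.2))

def miglior_voto_per_materia (studenti : List (List (String × List (String × List Int)))) : List (String × Int) :=
  (studenti.foldl
    (fun nd studente => ((PySem.Dict.mk studente).getD "materie" []).foldl updateA nd)
    (PySem.Dict.empty : PySem.Dict String Int)).items

-- ===== PORT B =====
def miglior_voto_per_materia_alt (studenti : List (List (String × List (String × List Int)))) : List (String × Int) :=
  let pairs := studenti.flatMap (fun studente =>
    ((PySem.Dict.mk studente).getD "materie" []).map (fun mv => (mv.1, pyMax mv.2)))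
  let subjects := PySem.List.dedup (pairs.map Prod.fst)
  subjects.map (fun m => (m, pyMax ((pairs.filter (fun p => p.1 == m)).map Prod.snd)))

-- ===== PRECONDITION & SPEC =====
-- Pre_ excludes exactly the inputs where Python A raises: a student without a "materie" key
-- (KeyError) or a subject with an empty grade list (ValueError from max([])); B raises there too.
def Pre_miglior_voto_per_materia (studenti : List (List (String × List (String × List Int)))) : Prop :=
  ∀ s ∈ studenti, ((PySem.Dict.mk s).get? "materie").isSome = true ∧
    ∀ kv ∈ (PySem.Dict.mk s).getD "materie" [], kv.2 ≠ ([] : List Int)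
instance (studenti : List (List (String × List (String × List Int)))) : Decidable (Pre_miglior_voto_per_materia studenti) := by unfold Pre_miglior_voto_per_materia; infer_instance

def pvWitness_miglior_voto_per_materia : (List (List (String × List (String × List Int)))) :=
  [[("materie", [("math", [5, 7]), ("art", [3])])], [("materie", [("math", [6])])]]

def Spec_miglior_voto_per_materia (studenti : List (List (String × List (String × List Int)))) (out : List (String × Int)) : Prop := out = miglior_voto_per_materia_alt studenti
instance (studenti : List (List (String × List (String × List Int)))) (out : List (String × Int)) : Decidable (Spec_miglior_voto_per_materia studenti out) := by unfold Spec_miglior_voto_per_materia; infer_instance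

-- ===== CLAIM (what is proved, stated in full; the proofs are below) =====
def Claim_equal_miglior_voto_per_materia : Prop := ∀ (studenti : List (List (String × List (String × List Int)))), Dom_miglior_voto_per_materia studenti → Pre_miglior_voto_per_materia studenti → Spec_miglior_voto_per_materia studenti (miglior_voto_per_materia studenti)

-- ===== LEMMAS AND PROOFS =====

-- the per-pair form of A's loop body (A's body applied after taking this student's max)
def stepA (nd : PySem.Dict String Int) (p : String × Int) : PySem.Dict String Int :=
  if nd.contains p.1 = false then nd.insert p.1 p.2
  else nd.insert p.1 (max (nd.getD p.1 0) p.2)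

-- B's per-subject reduction over a flat pair list
def bestOf (ps : List (String × Int)) (m : String) : Int :=
  pyMax ((ps.filter (fun p => p.1 == m)).map Prod.snd)

-- B's whole result as a function of the flat pair list
def specOf (ps : List (String × Int)) : List (String × Int) :=
  (PySem.List.dedup (ps.map Prod.fst)).map (fun m => (m, bestOf ps m))

lemma pyMax_singleton (m : Int) : pyMax [m] = m := by
  simp [pyMax, PySem.List.max?_id_cons]

lemma pyMax_append (l : List Int) (m : Int) (h : l ≠ []) :
    pyMax (l ++ [m]) = max (pyMax l) m := by
  cases l with
  | nil => exact absurd rfl h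
  | cons x t =>
    simp [pyMax, PySem.List.max?_id_cons, List.foldl_append]

lemma foldl_flatMap {α β γ : Type} (g : α → List β) (f : γ → β → γ)
    (l : List α) (init : γ) :
    (l.flatMap g).foldl f init = l.foldl (fun acc x => (g x).foldl f acc) init := by
  induction l generalizing init with
  | nil => rfl
  | cons x t ih => simp [List.flatMap_cons, List.foldl_append, ih]

lemma dedup_append_singleton {α : Type} [DecidableEq α] (l : List α) (x : α) :
    PySem.List.dedup (l ++ [x]) =
      if x ∈ l then PySem.List.dedup l else PySem.List.dedup l ++ [x] := by
  rw [PySem.List.dedup_eq_ofList, PySem.List.dedup_eq_ofList,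
      PySem.Set.ofList_eq_foldl, PySem.Set.ofList_eq_foldl, List.foldl_append]
  simp only [List.foldl_cons, List.foldl_nil]
  show PySem.Set.add _ x = _
  rw [PySem.Set.add]
  have hmem : PySem.Set.contains (l.foldl PySem.Set.add []) x = decide (x ∈ l) := by
    rw [PySem.Set.contains_eq_listContains, ← PySem.Set.ofList_eq_foldl,
        ← PySem.List.dedup_eq_ofList]
    simp [List.contains_eq_mem]
  by_cases hx : x ∈ l
  · rw [if_pos hx, if_pos (by rw [hmem]; simpa using hx)]
  · rw [if_neg hx, if_neg (by rw [hmem]; simpa using hx)]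

lemma bestOf_append_ne (ps : List (String × Int)) (p : String × Int) (m : String)
    (h : m ≠ p.1) : bestOf (ps ++ [p]) m = bestOf ps m := by
  unfold bestOf
  have hf : (p.1 == m) = false := by simpa using h.symm
  simp [List.filter_append, hf]

lemma filter_fst_ne_nil (ps : List (String × Int)) (m : String)
    (h : m ∈ ps.map Prod.fst) : ps.filter (fun p => p.1 == m) ≠ [] := by
  obtain ⟨p, hp, hm⟩ := List.mem_map.mp h
  intro hnil
  have := List.filter_eq_nil_iff.mp hnil p hp
  simp [hm] at this

lemma bestOf_append_self_mem (ps : List (String × Int)) (p : String × Int)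
    (h : p.1 ∈ ps.map Prod.fst) :
    bestOf (ps ++ [p]) p.1 = max (bestOf ps p.1) p.2 := by
  unfold bestOf
  rw [List.filter_append]
  simp only [List.filter, beq_self_eq_true]
  rw [List.map_append]
  exact pyMax_append _ _ (by
    intro hnil
    exact filter_fst_ne_nil ps p.1 h (by simpa using List.map_eq_nil_iff.mp hnil))

lemma bestOf_append_self_fresh (ps : List (String × Int)) (p : String × Int)
    (h : p.1 ∉ ps.map Prod.fst) :
    bestOf (ps ++ [p]) p.1 = p.2 := by
  unfold bestOf
  rw [List.filter_append]
  have hnil : ps.filter (fun q => q.1 == p.1) = [] := by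
    rw [List.filter_eq_nil_iff]
    intro q hq
    simp only [beq_iff_eq]
    intro hqp
    exact h (List.mem_map.mpr ⟨q, hq, hqp⟩)
  simp [hnil, pyMax_singleton]

-- keys of a dict whose items are specOf pref
lemma keys_of_items_spec (nd : PySem.Dict String Int) (pref : List (String × Int))
    (h : nd.items = specOf pref) : nd.keys = PySem.List.dedup (pref.map Prod.fst) := by
  simp only [PySem.Dict.keys]
  rw [h, specOf, List.map_map]
  simp [Function.comp_def]

-- one step of A preserves the coupling to B's flat-list spec
lemma step_spec (nd : PySem.Dict String Int) (pref : List (String × Int)) (p : String × Int)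
    (h : nd.items = specOf pref) : (stepA nd p).items = specOf (pref ++ [p]) := by
  have hkeys : nd.keys = PySem.List.dedup (pref.map Prod.fst) := keys_of_items_spec nd pref h
  have hnodup : nd.keys.Nodup := by rw [hkeys]; exact PySem.List.nodup_dedup _
  have hcont : nd.contains p.1 = decide (p.1 ∈ pref.map Prod.fst) := by
    rw [PySem.Dict.contains_eq_decide_mem_keys, hkeys]
    simp
  by_cases hmem : p.1 ∈ pref.map Prod.fst
  · -- existing subject: in-place overwrite on A's side, same key list on B's side
    have hc : nd.contains p.1 = true := by rw [hcont]; simpa using hmem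
    have hbest : nd.getD p.1 0 = bestOf pref p.1 := by
      apply PySem.Dict.getD_of_mem_items
      · rw [h, specOf]
        exact List.mem_map.mpr ⟨p.1, by rw [PySem.List.mem_dedup]; exact hmem, rfl⟩
      · exact hnodup
    rw [stepA, if_neg (by simp [hc]), PySem.Dict.items_insert_of_contains _ _ hc, h,
        specOf, specOf]
    simp only [List.map_append, List.map_cons, List.map_nil]
    rw [dedup_append_singleton, if_pos hmem, List.map_map]
    apply List.map_congr_left
    intro m hm
    by_cases hmp : m = p.1
    · subst hmp
      simp [hbest, bestOf_append_self_mem pref p hmem]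
    · simp [Function.comp, (by simpa using hmp : (m == p.1) = false),
            bestOf_append_ne pref p m hmp]
  · -- fresh subject: both sides append it at the end
    have hc : nd.contains p.1 = false := by rw [hcont]; simpa using hmem
    rw [stepA, if_pos hc, PySem.Dict.items_insert_of_not_contains _ _ hc, h,
        specOf, specOf]
    simp only [List.map_append, List.map_cons, List.map_nil]
    rw [dedup_append_singleton, if_neg hmem, List.map_append]
    congr 1
    · apply List.map_congr_left
      intro m hm
      have hmp : m ≠ p.1 := by
        intro he; subst he
        exact hmem ((PySem.List.mem_dedup _ _).mp hm)
      rw [bestOf_append_ne pref p m hmp]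
    · simp [bestOf_append_self_fresh pref p hmem]

lemma fold_spec (ps : List (String × Int)) (pref : List (String × Int))
    (nd : PySem.Dict String Int) (h : nd.items = specOf pref) :
    (ps.foldl stepA nd).items = specOf (pref ++ ps) := by
  induction ps generalizing pref nd with
  | nil => simpa using h
  | cons p t ih =>
    have := ih (pref ++ [p]) (stepA nd p) (step_spec nd pref p h)
    simpa [List.append_assoc] using this

-- ===== VERDICT (by name: the statement is the Claim_ definition above) =====
theorem miglior_voto_per_materia_spec : Claim_equal_miglior_voto_per_materia := by
  intro studenti _ _
  show miglior_voto_per_materia studenti = miglior_voto_per_materia_alt studenti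
  unfold miglior_voto_per_materia miglior_voto_per_materia_alt
  have hA : (studenti.foldl
      (fun nd studente => ((PySem.Dict.mk studente).getD "materie" []).foldl updateA nd)
      (PySem.Dict.empty : PySem.Dict String Int)) =
      (studenti.flatMap (fun studente =>
        ((PySem.Dict.mk studente).getD "materie" []).map (fun mv => (mv.1, pyMax mv.2)))).foldl
        stepA PySem.Dict.empty := by
    rw [foldl_flatMap]
    congr 1
    funext nd s
    rw [List.foldl_map]
    rfl
  rw [hA]
  have := fold_spec (studenti.flatMap (fun studente =>
      ((PySem.Dict.mk studente).getD "materie" []).map (fun mv => (mv.1, pyMax mv.2))))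
      [] PySem.Dict.empty (by rfl)
  simpa [specOf, bestOf] using this
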